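-- pv_equiv track=rewrite | github.com/UlfHed/RSA-Lab | rsa-response.py | get_decimalText
-- ===== SOURCE A (Python) =====
-- def get_decimalText(text):
--     # input is a string, output list of each block of 3 characters as 3 decimals each => 9 numbers each block.
--     decimalText = ''
--     count = 0
--     for symbol in text:
--         decimalSymbol = str(ord(symbol))
--         if len(decimalSymbol) < 3:
--             decimalSymbol = decimalSymbol.zfill(3)
--         decimalText += decimalSymbol
--         count += 1
--         if count == 3:
--             decimalText += ' ' # Add a space for every block of 3 characters in decimals.
--             count = 0
--     return decimalText.split()
-- ===== SOURCE B (Python) =====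
-- def get_decimalText(text):
--     parts = [str(ord(c)).zfill(3) for c in text]
--     return [''.join(parts[i:i+3]) for i in range(0, len(parts), 3)]
-- ===== Notes on version B (the rewrite author's own statement) =====
-- stated objective: simpler
-- what changed: A concatenates padded codes into one big string with a space inserted after every third character via a running counter and finally re-splits that string on whitespace; B never builds the separator string at all: it maps each character to its zero-padded code and forms the result by slicing that list into chunks of three and joining each chunk.
import Mathlib
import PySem

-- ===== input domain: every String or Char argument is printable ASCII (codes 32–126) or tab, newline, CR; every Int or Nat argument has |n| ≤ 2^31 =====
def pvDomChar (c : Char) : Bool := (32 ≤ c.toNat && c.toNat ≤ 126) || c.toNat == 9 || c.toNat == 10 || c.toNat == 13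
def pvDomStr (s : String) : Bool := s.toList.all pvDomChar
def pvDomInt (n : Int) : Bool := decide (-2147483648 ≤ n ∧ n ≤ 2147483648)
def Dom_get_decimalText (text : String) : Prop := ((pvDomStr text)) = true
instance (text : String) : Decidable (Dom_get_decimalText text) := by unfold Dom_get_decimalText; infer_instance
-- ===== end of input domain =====

-- B replaces A's counter-driven string building and final split() by a map-then-chunk decomposition (simpler; same cost).


-- ===== PORT A =====
-- the loop body of A: append str(ord(symbol)) (zero-padded when shorter than 3), count up, emit ' ' at every third
def pvStepA (st : List Char × Int) (symbol : Char) : List Char × Int :=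
  let decimalSymbol := PySem.Int.toChars (symbol.toNat : Int)
  let decimalSymbol := if decimalSymbol.length < 3 then PySem.Chars.zfill decimalSymbol 3 else decimalSymbol
  let decimalText := st.1 ++ decimalSymbol
  let count := st.2 + 1
  if count = 3 then (decimalText ++ [' '], 0) else (decimalText, count)

def get_decimalText (text : String) : List String :=
  let st := text.toList.foldl pvStepA ([], 0)
  (PySem.Chars.split₀ st.1).map String.ofList

-- ===== PORT B =====
-- str(ord(c)).zfill(3)
def pvTok (c : Char) : List Char := PySem.Chars.zfill (PySem.Int.toChars (c.toNat : Int)) 3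

def get_decimalText_alt (text : String) : List String :=
  let parts := text.toList.map pvTok
  (PySem.List.pyRange 0 (parts.length : Int) 3).map
    (fun i => String.ofList (PySem.Chars.join [] (PySem.List.slice parts (some i) (some (i + 3)))))

-- ===== PRECONDITION & SPEC =====
def Spec_get_decimalText (text : String) (out : List String) : Prop := out = get_decimalText_alt text
instance (text : String) (out : List String) : Decidable (Spec_get_decimalText text out) := by unfold Spec_get_decimalText; infer_instance

-- ===== CLAIM (what is proved, stated in full; the proofs are below) =====
def Claim_equal_get_decimalText : Prop := ∀ (text : String), Dom_get_decimalText text → Spec_get_decimalText text (get_decimalText text)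

-- ===== LEMMAS AND PROOFS =====

-- the string A has built after processing cs from an empty-count state
def pvSep : List Char → List Char
  | [] => []
  | [a] => pvTok a
  | [a, b] => pvTok a ++ pvTok b
  | a :: b :: c :: r => pvTok a ++ pvTok b ++ pvTok c ++ [' '] ++ pvSep r

-- A's counter after processing cs from an empty-count state
def pvCnt : List Char → Int
  | [] => 0
  | [_] => 1
  | [_, _] => 2
  | _ :: _ :: _ :: r => pvCnt r

-- consecutive groups of at most three
def pvChunk3 {α : Type} : List α → List (List α)
  | [] => []
  | [a] => [[a]]
  | [a, b] => [[a, b]]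
  | a :: b :: c :: r => [a, b, c] :: pvChunk3 r

def pvWordOf (ch : List Char) : List Char := (ch.map pvTok).flatten

def pvTokOk (n : Nat) : Bool :=
  let t := PySem.Chars.zfill (PySem.Int.toChars (n : Int)) 3
  t.length == 3 && t.all (fun c => !PySem.Chars.isspace c) &&
    ((if (PySem.Int.toChars (n : Int)).length < 3 then PySem.Chars.zfill (PySem.Int.toChars (n : Int)) 3
      else PySem.Int.toChars (n : Int)) == t)

set_option maxRecDepth 8000 in
lemma pv_all_tok_ok : ((List.range 127).all pvTokOk) = true := by decide

lemma pv_tok_ok (c : Char) (h : pvDomChar c = true) : pvTokOk c.toNat = true := by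
  have hlt : c.toNat < 127 := by
    simp [pvDomChar] at h
    omega
  have := List.all_eq_true.mp pv_all_tok_ok c.toNat (List.mem_range.mpr hlt)
  exact this

lemma pv_tok_len (c : Char) (h : pvDomChar c = true) : (pvTok c).length = 3 := by
  have := pv_tok_ok c h
  simp [pvTokOk, Bool.and_eq_true] at this
  simpa [pvTok] using this.1.1

lemma pv_tok_nonspace (c : Char) (h : pvDomChar c = true) :
    ∀ x ∈ pvTok c, PySem.Chars.isspace x = false := by
  have := pv_tok_ok c h
  simp [pvTokOk, Bool.and_eq_true, List.all_eq_true] at this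
  intro x hx
  simpa using this.1.2 x (by simpa [pvTok] using hx)

lemma pv_tok_cond (c : Char) (h : pvDomChar c = true) :
    (if (PySem.Int.toChars (c.toNat : Int)).length < 3
      then PySem.Chars.zfill (PySem.Int.toChars (c.toNat : Int)) 3
      else PySem.Int.toChars (c.toNat : Int)) = pvTok c := by
  have := pv_tok_ok c h
  simp [pvTokOk, Bool.and_eq_true] at this
  simpa [pvTok] using this.2

lemma pv_tok_ne_nil (c : Char) (h : pvDomChar c = true) : pvTok c ≠ [] := by
  intro hn
  have := pv_tok_len c h
  simp [hn] at this

-- one A-step from a counter state k ≠ 2 (list form); and from counter 2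
lemma pv_stepA_eq (acc : List Char) (k : Int) (c : Char) (h : pvDomChar c = true) :
    pvStepA (acc, k) c =
      (if k + 1 = 3 then (acc ++ pvTok c ++ [' '], 0) else (acc ++ pvTok c, k + 1)) := by
  simp only [pvStepA, pv_tok_cond c h]

lemma pv_A_fold (cs : List Char) (hdom : ∀ c ∈ cs, pvDomChar c = true) :
    ∀ acc, List.foldl pvStepA (acc, 0) cs = (acc ++ pvSep cs, pvCnt cs) := by
  induction cs using pvSep.induct with
  | case1 => intro acc; simp [pvSep, pvCnt]
  | case2 a =>
      intro acc
      have ha := hdom a (by simp)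
      simp [List.foldl, pv_stepA_eq _ _ _ ha, pvSep, pvCnt]
  | case3 a b =>
      intro acc
      have ha := hdom a (by simp)
      have hb := hdom b (by simp)
      simp [List.foldl, pv_stepA_eq _ _ _ ha, pv_stepA_eq _ _ _ hb, pvSep, pvCnt]
  | case4 a b c r ih =>
      intro acc
      have ha := hdom a (by simp)
      have hb := hdom b (by simp)
      have hc := hdom c (by simp)
      have hr : ∀ x ∈ r, pvDomChar x = true := by
        intro x hx; exact hdom x (by simp [hx])
      simp only [List.foldl, pv_stepA_eq _ _ _ ha, pv_stepA_eq _ _ _ hb, pv_stepA_eq _ _ _ hc]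
      norm_num
      rw [ih hr]
      simp [pvSep, pvCnt]

-- split().go consumes a space-free word into the current-word accumulator
lemma pv_go_word (w : List Char) (hw : ∀ x ∈ w, PySem.Chars.isspace x = false) :
    ∀ s cur acc, PySem.Chars.split₀.go (w ++ s) cur acc = PySem.Chars.split₀.go s (w.reverse ++ cur) acc := by
  induction w with
  | nil => intro s cur acc; simp
  | cons c w ih =>
      intro s cur acc
      have hc := hw c (by simp)
      have hw' : ∀ x ∈ w, PySem.Chars.isspace x = false := fun x hx => hw x (by simp [hx])
      simp only [List.cons_append, PySem.Chars.split₀.go, hc]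
      simp only [Bool.false_eq_true, if_false, ih hw']
      simp

lemma pv_split_sep (cs : List Char) (hdom : ∀ c ∈ cs, pvDomChar c = true) :
    ∀ acc, PySem.Chars.split₀.go (pvSep cs) [] acc = acc.reverse ++ (pvChunk3 cs).map pvWordOf := by
  induction cs using pvSep.induct with
  | case1 => intro acc; simp [pvSep, pvChunk3, PySem.Chars.split₀.go]
  | case2 a =>
      intro acc
      have ha := hdom a (by simp)
      rw [pvSep, show pvTok a = pvTok a ++ [] from by simp,
        pv_go_word _ (pv_tok_nonspace a ha)]
      simp [PySem.Chars.split₀.go, pvChunk3, pvWordOf, pv_tok_ne_nil a ha]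
  | case3 a b =>
      intro acc
      have ha := hdom a (by simp)
      have hb := hdom b (by simp)
      have hns : ∀ x ∈ pvTok a ++ pvTok b, PySem.Chars.isspace x = false := by
        intro x hx
        rcases List.mem_append.mp hx with h | h
        · exact pv_tok_nonspace a ha x h
        · exact pv_tok_nonspace b hb x h
      rw [pvSep, show pvTok a ++ pvTok b = (pvTok a ++ pvTok b) ++ [] from by simp,
        pv_go_word _ hns]
      simp [PySem.Chars.split₀.go, pvChunk3, pvWordOf, pv_tok_ne_nil a ha]
  | case4 a b c r ih =>
      intro acc
      have ha := hdom a (by simp)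
      have hb := hdom b (by simp)
      have hc := hdom c (by simp)
      have hr : ∀ x ∈ r, pvDomChar x = true := fun x hx => hdom x (by simp [hx])
      have hns : ∀ x ∈ pvTok a ++ pvTok b ++ pvTok c, PySem.Chars.isspace x = false := by
        intro x hx
        rcases List.mem_append.mp hx with h | h
        · rcases List.mem_append.mp h with h' | h'
          · exact pv_tok_nonspace a ha x h'
          · exact pv_tok_nonspace b hb x h'
        · exact pv_tok_nonspace c hc x h
      have hshape : pvSep (a :: b :: c :: r) =
          (pvTok a ++ pvTok b ++ pvTok c) ++ (' ' :: pvSep r) := by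
        simp [pvSep]
      rw [hshape, pv_go_word _ hns]
      have hcur : ((pvTok a ++ pvTok b ++ pvTok c).reverse ++ ([] : List Char)).isEmpty = false := by
        simp [pv_tok_ne_nil a ha]
      simp only [PySem.Chars.split₀.go, PySem.Chars.isspace, hcur]
      norm_num
      rw [ih hr]
      simp [pvChunk3, pvWordOf]

lemma pv_join_nil_flatten (l : List (List Char)) : PySem.Chars.join [] l = l.flatten := by
  induction l with
  | nil => simp [PySem.Chars.join_nil]
  | cons p l ih =>
      cases l with
      | nil => simp [PySem.Chars.join_singleton]
      | cons q r => rw [PySem.Chars.join_cons_cons]; simp at ih ⊢; simpa using ih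

lemma pv_chunk3_map {α β : Type} (f : α → β) (cs : List α) :
    pvChunk3 (cs.map f) = (pvChunk3 cs).map (List.map f) := by
  induction cs using pvChunk3.induct with
  | case1 => simp [pvChunk3]
  | case2 a => simp [pvChunk3]
  | case3 a b => simp [pvChunk3]
  | case4 a b c r ih => simp [pvChunk3, ih]

lemma pv_range_chunks {α : Type} (parts : List α) :
    (List.range ((parts.length + 2) / 3)).map (fun k => (parts.drop (3 * k)).take 3) =
      pvChunk3 parts := by
  induction parts using pvChunk3.induct with
  | case1 => simp [pvChunk3]
  | case2 a => simp [pvChunk3, List.range_succ]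
  | case3 a b => simp [pvChunk3, List.range_succ]
  | case4 a b c r ih =>
      have hm : ((a :: b :: c :: r).length + 2) / 3 = (r.length + 2) / 3 + 1 := by
        simp only [List.length_cons]; omega
      rw [hm, List.range_succ_eq_map, List.map_cons, List.map_map]
      have hdrop : ∀ k : Nat, (a :: b :: c :: r).drop (3 * (k + 1)) = r.drop (3 * k) := by
        intro k
        have : 3 * (k + 1) = 3 * k + 3 := by ring
        simp [this, List.drop_succ_cons]
      rw [pvChunk3]
      refine List.cons_eq_cons.mpr ⟨by simp, ?_⟩
      rw [← ih]
      apply List.map_congr_left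
      intro k _
      simp only [Function.comp_apply, Nat.succ_eq_add_one]
      rw [hdrop k]

lemma pv_B_eq (text : String) :
    get_decimalText_alt text =
      ((pvChunk3 text.toList).map pvWordOf).map String.ofList := by
  unfold get_decimalText_alt
  show (PySem.List.pyRange 0 ((text.toList.map pvTok).length : Int) 3).map
    (fun i => String.ofList (PySem.Chars.join [] (PySem.List.slice (text.toList.map pvTok) (some i) (some (i + 3))))) = _
  set cs := text.toList with hcs
  set parts := cs.map pvTok with hp
  have hpos : (0 : Int) < 3 := by norm_num
  rw [PySem.List.pyRange_of_pos 0 (parts.length : Int) hpos]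
  have hcount : (if (0 : Int) < (parts.length : Int) then ((((parts.length : Int) - 0 + 3 - 1) / 3)).toNat else 0)
      = (parts.length + 2) / 3 := by
    by_cases h : 0 < parts.length
    · rw [if_pos (by exact_mod_cast h)]
      omega
    · rw [if_neg (by exact_mod_cast h)]
      omega
  rw [hcount, List.map_map]
  have hstep : ∀ k ∈ List.range ((parts.length + 2) / 3),
      ((fun i => String.ofList (PySem.Chars.join [] (PySem.List.slice parts (some i) (some (i + 3))))) ∘
          (fun k : Nat => (0 : Int) + 3 * (k : Int))) k =
        String.ofList ((parts.drop (3 * k)).take 3).flatten := by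
    intro k _
    simp only [Function.comp_apply]
    rw [show ((0 : Int) + 3 * (k : Int)) = ((3 * k : Nat) : Int) from by push_cast; ring]
    rw [show (((3 * k : Nat) : Int) + 3) = ((3 * k + 3 : Nat) : Int) from by push_cast; ring]
    rw [PySem.List.slice_natCast, pv_join_nil_flatten]
    norm_num
  rw [List.map_congr_left hstep]
  calc (List.range ((parts.length + 2) / 3)).map (fun k => String.ofList ((parts.drop (3 * k)).take 3).flatten)
      = ((List.range ((parts.length + 2) / 3)).map (fun k => (parts.drop (3 * k)).take 3)).map
          (fun ch => String.ofList ch.flatten) := by rw [List.map_map]; rfl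
    _ = (pvChunk3 parts).map (fun ch => String.ofList ch.flatten) := by rw [pv_range_chunks]
    _ = ((pvChunk3 cs).map pvWordOf).map String.ofList := by
        rw [hp, pv_chunk3_map, List.map_map, List.map_map]
        apply List.map_congr_left
        intro ch _
        simp [pvWordOf]

-- ===== VERDICT (by name: the statement is the Claim_ definition above) =====
theorem get_decimalText_spec : Claim_equal_get_decimalText := by
  intro text hdom
  unfold Spec_get_decimalText
  have hdom' : ∀ c ∈ text.toList, pvDomChar c = true := by
    have := hdom
    simpa [Dom_get_decimalText, pvDomStr, List.all_eq_true] using this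
  unfold get_decimalText
  rw [pv_A_fold text.toList hdom' []]
  show (PySem.Chars.split₀ (pvSep text.toList)).map String.ofList = _
  rw [show PySem.Chars.split₀ (pvSep text.toList) = PySem.Chars.split₀.go (pvSep text.toList) [] [] from rfl,
    pv_split_sep text.toList hdom' []]
  rw [pv_B_eq]
  simp
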